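-- pv_equiv track=rewrite | github.com/willparker123/scalable-cloud-app | data_handler.py | get_diff_matrix
-- ===== SOURCE A (Python) =====
-- def get_diff_matrix(lists):
--     #*** SMALLEST SUM OF DIFFERENCE BETWEEN N LISTS (len(lists)) ***
--     #lists = [[]]
--     sums = list(map(lambda l: sum(l), lists))
--     diffmatrix = []
--     for a in range(len(sums)):
--         diffs = [None]*len(sums)
--         diffmatrix.append(diffs)
--     for a in range(len(sums)):
--         for b in range(len(sums)):
--             if a == b:
--                 continue
--             if diffmatrix[b][a] is not None:
--                 diffmatrix[a][b] = diffmatrix[b][a]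
--             xs = lists[a]
--             ys = lists[b]
--             diffmatrix[a][b] = sum(abs(x - y) for x, y in zip(sorted(xs), sorted(ys)))
--     #[[None, 97924, 202900, 275212],
--     #[97924, None, 104976, 177288],
--     #[202900, 104976, None, 72312],
--     #[275212, 177288, 72312, None]]
--     #
--     #    00 01 02 03 10 11 12 13 20 21 22 23
--     # 0 1 2 3
--     #0X Y
--     #1Y X Y
--     #2  Y X Y
--     #3    Y X
--     return diffmatrix
-- ===== SOURCE B (Python) =====
-- def get_diff_matrix(lists):
--     srt = [sorted(l) for l in lists]
--     n = len(srt)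
--     m = [[None] * n for _ in range(n)]
--     for a in range(n):
--         for b in range(a + 1, n):
--             d = sum(abs(x - y) for x, y in zip(srt[a], srt[b]))
--             m[a][b] = d
--             m[b][a] = d
--     return m
-- ===== Notes on version B (the rewrite author's own statement) =====
-- stated objective: faster
-- what changed: B sorts every list exactly once up front and computes each unordered pair's summed abs-diff once, filling both symmetric cells of a preallocated matrix, instead of A's fill that re-sorts both lists and recomputes the sum for every ordered pair (A's symmetry-copy branch is dead code, immediately overwritten).
import Mathlib
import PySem

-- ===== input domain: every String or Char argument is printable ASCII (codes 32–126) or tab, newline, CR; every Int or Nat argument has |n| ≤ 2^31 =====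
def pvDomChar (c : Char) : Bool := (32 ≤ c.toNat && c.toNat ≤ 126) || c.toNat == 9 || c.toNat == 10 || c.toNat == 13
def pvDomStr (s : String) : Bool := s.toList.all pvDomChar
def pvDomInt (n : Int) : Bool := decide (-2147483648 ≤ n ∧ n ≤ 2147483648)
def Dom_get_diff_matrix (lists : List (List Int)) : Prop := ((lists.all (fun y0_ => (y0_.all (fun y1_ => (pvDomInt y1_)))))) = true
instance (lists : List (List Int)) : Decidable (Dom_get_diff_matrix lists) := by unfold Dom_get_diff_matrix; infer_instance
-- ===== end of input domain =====

-- ===== PORT A =====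
-- Literal port of A. Python indices a, b always satisfy 0 ≤ a,b < len(lists), so
-- lists[a] / diffmatrix[a] are ported with getD (in-range, hence exact).
def get_diff_matrix (lists : List (List Int)) : List (List (Option Int)) :=
  let sums := lists.map (fun l => l.foldl (· + ·) 0)
  let diffmatrix := (List.range sums.length).foldl
      (fun m _ => m ++ [List.replicate sums.length (none : Option Int)]) []
  (List.range sums.length).foldl (fun m a =>
    (List.range sums.length).foldl (fun m b =>
      if a = b then m
      else
        let m :=
          if ((m.getD b []).getD a none).isSome then
            m.set a ((m.getD a []).set b ((m.getD b []).getD a none))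
          else m
        let xs := lists.getD a []
        let ys := lists.getD b []
        m.set a ((m.getD a []).set b
          (some ((((PySem.List.sorted xs (fun x => x) false).zip
                   (PySem.List.sorted ys (fun x => x) false)).map
                   (fun p => |p.1 - p.2|)).foldl (· + ·) 0)))) m) diffmatrix

-- ===== PORT B =====
-- sum(abs(x - y) for x, y in zip(sa, sb))
def pairDiff (sa sb : List Int) : Int :=
  ((sa.zip sb).map (fun p => |p.1 - p.2|)).foldl (· + ·) 0

-- B: sort each list once, compute each unordered pair once, fill both symmetric cells.
def get_diff_matrix_alt (lists : List (List Int)) : List (List (Option Int)) :=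
  let srt := lists.map (fun l => PySem.List.sorted l (fun x => x) false)
  let n := srt.length
  let m0 := (List.range n).map (fun _ => List.replicate n (none : Option Int))
  (List.range n).foldl (fun m a =>
    (List.range' (a + 1) (n - (a + 1))).foldl (fun m b =>
      let d := pairDiff (srt.getD a []) (srt.getD b [])
      let m' := m.set a ((m.getD a []).set b (some d))
      m'.set b ((m'.getD b []).set a (some d))) m) m0

-- ===== PRECONDITION & SPEC =====
def Spec_get_diff_matrix (lists : List (List Int)) (out : List (List (Option Int))) : Prop := out = get_diff_matrix_alt lists
instance (lists : List (List Int)) (out : List (List (Option Int))) : Decidable (Spec_get_diff_matrix lists out) := by unfold Spec_get_diff_matrix; infer_instance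

-- ===== CLAIM (what is proved, stated in full; the proofs are below) =====
def Claim_equal_get_diff_matrix : Prop := ∀ (lists : List (List Int)), Dom_get_diff_matrix lists → Spec_get_diff_matrix lists (get_diff_matrix lists)

-- ===== LEMMAS AND PROOFS =====

-- the value both programs put at off-diagonal cell (a, b)
def cellVal (lists : List (List Int)) (a b : Nat) : Int :=
  (((PySem.List.sorted (lists.getD a []) (fun x => x) false).zip
    (PySem.List.sorted (lists.getD b []) (fun x => x) false)).map
    (fun p => |p.1 - p.2|)).foldl (· + ·) 0

-- the row both programs end with
def targetRow (lists : List (List Int)) (n a : Nat) : List (Option Int) :=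
  (List.range n).map (fun b => if b = a then (none : Option Int) else some (cellVal lists a b))

-- A's first loop builds the all-None matrix
lemma foldl_append_replicate {c : List (Option Int)} (l : List Nat) (acc : List (List (Option Int))) :
    l.foldl (fun m _ => m ++ [c]) acc = acc ++ List.replicate l.length c := by
  induction l generalizing acc with
  | nil => simp
  | cons x t ih => simp [List.foldl_cons, ih, List.replicate_succ]

lemma set_getD_self {α : Type} (m : List α) (a : Nat) (d : α) (ha : a < m.length) :
    m.set a (m.getD a d) = m := by
  rw [List.getD_eq_getElem _ _ ha, List.set_getElem_self]

lemma getD_set_self {α : Type} (m : List α) (a : Nat) (r d : α) (ha : a < m.length) :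
    (m.set a r).getD a d = r := by
  simp [List.getD, ha]

-- row fill: length is preserved
lemma rowFold_length (a : Nat) (g : Nat → Option Int) (l : List Nat) (r : List (Option Int)) :
    (l.foldl (fun r b => if a = b then r else r.set b (g b)) r).length = r.length := by
  induction l generalizing r with
  | nil => rfl
  | cons x t ih => simp only [List.foldl_cons]; rw [ih]; split <;> simp

-- row fill over range n: cell characterization
lemma rowFold_getElem? (a : Nat) (g : Nat → Option Int) (n : Nat) (r : List (Option Int))
    (hn : n ≤ r.length) (i : Nat) :
    ((List.range n).foldl (fun r b => if a = b then r else r.set b (g b)) r)[i]? =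
      if i < n ∧ i ≠ a then some (g i) else r[i]? := by
  induction n with
  | zero => simp
  | succ k ih =>
    have hk : k ≤ r.length := by omega
    rw [List.range_succ, List.foldl_append]
    simp only [List.foldl_cons, List.foldl_nil]
    by_cases hak : a = k
    · rw [if_pos hak, ih hk]
      split_ifs <;> first | rfl | omega
    · rw [if_neg hak, List.getElem?_set, rowFold_length, ih hk]
      by_cases hki : k = i
      · subst hki
        have : k < r.length := by omega
        simp only [if_pos this]
        split_ifs <;> first | rfl | omega
      · rw [if_neg hki]
        split_ifs <;> first | rfl | omega

-- one step of A's inner loop only rewrites row a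
lemma innerStep_eq (lists : List (List Int)) (a b : Nat) (m : List (List (Option Int)))
    (ha : a < m.length) :
    (if a = b then m
     else
       let m' :=
         if ((m.getD b []).getD a none).isSome then
           m.set a ((m.getD a []).set b ((m.getD b []).getD a none))
         else m
       m'.set a ((m'.getD a []).set b (some (cellVal lists a b)))) =
    m.set a (if a = b then m.getD a [] else (m.getD a []).set b (some (cellVal lists a b))) := by
  by_cases hab : a = b
  · rw [if_pos hab, if_pos hab, set_getD_self m a [] ha]
  · rw [if_neg hab, if_neg hab]
    by_cases hc : ((m.getD b []).getD a none).isSome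
    · simp only [hc, if_pos]
      rw [getD_set_self _ _ _ _ ha, List.set_set, List.set_set]
    · simp only [hc]
      rw [if_neg (by simp)]

-- A's inner loop = set row a to the row-fold result
lemma innerFold_eq (lists : List (List Int)) (a : Nat) (l : List Nat)
    (m : List (List (Option Int))) (ha : a < m.length) :
    (l.foldl (fun m b =>
      if a = b then m
      else
        let m' :=
          if ((m.getD b []).getD a none).isSome then
            m.set a ((m.getD a []).set b ((m.getD b []).getD a none))
          else m
        m'.set a ((m'.getD a []).set b (some (cellVal lists a b)))) m) =
    m.set a (l.foldl (fun r b => if a = b then r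
              else r.set b (some (cellVal lists a b))) (m.getD a [])) := by
  induction l generalizing m with
  | nil => exact (set_getD_self m a [] ha).symm
  | cons x t ih =>
    simp only [List.foldl_cons]
    rw [innerStep_eq lists a x m ha]
    rw [ih _ (by simpa using ha)]
    rw [List.set_set]
    congr 1
    rw [getD_set_self _ _ _ _ ha]

-- the target row is the row-fold of an all-None row
lemma rowFold_replicate (lists : List (List Int)) (n a : Nat) :
    ((List.range n).foldl (fun r b => if a = b then r
        else r.set b (some (cellVal lists a b))) (List.replicate n none)) =
    targetRow lists n a := by
  apply List.ext_getElem?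
  intro i
  rw [rowFold_getElem? a (fun b => some (cellVal lists a b)) n _ (by simp) i]
  by_cases hi : i < n
  · simp only [targetRow, List.getElem?_map, List.getElem?_range hi]
    by_cases hia : i = a <;> simp [hia, hi, List.getElem?_replicate]
    omega
  · have hni : n ≤ i := le_of_not_gt hi
    rw [if_neg (by omega), List.getElem?_eq_none (by simpa using hni),
      List.getElem?_eq_none (by simp [targetRow]; omega)]

-- A's outer loop, first k iterations
lemma outerFold_eq (lists : List (List Int)) (n k : Nat) (hk : k ≤ n) :
    ((List.range k).foldl (fun m a =>
      (List.range n).foldl (fun m b =>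
        if a = b then m
        else
          let m' :=
            if ((m.getD b []).getD a none).isSome then
              m.set a ((m.getD a []).set b ((m.getD b []).getD a none))
            else m
          m'.set a ((m'.getD a []).set b (some (cellVal lists a b)))) m)
      (List.replicate n (List.replicate n none))) =
    (List.range n).map (fun a => if a < k then targetRow lists n a
                                 else List.replicate n (none : Option Int)) := by
  induction k with
  | zero =>
    simp only [List.range_zero, List.foldl_nil, Nat.not_lt_zero, if_false]
    rw [List.map_const', List.length_range]
  | succ k ih =>
    have hk' : k ≤ n := by omega
    rw [List.range_succ, List.foldl_append, ih hk', List.foldl_cons, List.foldl_nil]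
    rw [innerFold_eq lists k _ _ (by simpa using hk)]
    have hgd : ((List.range n).map (fun a => if a < k then targetRow lists n a
        else List.replicate n (none : Option Int))).getD k [] = List.replicate n none := by
      rw [List.getD, List.getElem?_map, List.getElem?_range (by omega)]
      simp
    rw [hgd, rowFold_replicate]
    apply List.ext_getElem?
    intro i
    rw [List.getElem?_set]
    by_cases hi : i < n
    · simp only [List.getElem?_map, List.getElem?_range hi, List.length_map, List.length_range]
      by_cases hik : k = i
      · subst hik
        simp [hi]
      · simp only [if_neg hik, Option.map_some]
        by_cases h1 : i < k
        · simp [h1, show i < k + 1 by omega]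
        · simp [h1, show ¬ i < k + 1 by omega]
    · rw [if_neg (by intro h; subst h; exact hi (by omega))]
      rw [List.getElem?_eq_none (by simp; omega), List.getElem?_eq_none (by simp; omega)]

-- ===== B-side lemmas =====

lemma map_abs_zip_comm : ∀ (sa sb : List Int),
    ((sa.zip sb).map (fun p => |p.1 - p.2|)) = ((sb.zip sa).map (fun p => |p.1 - p.2|))
  | [], sb => by cases sb <;> rfl
  | x :: ta, [] => rfl
  | x :: ta, y :: tb => by
    simp only [List.zip_cons_cons, List.map_cons, map_abs_zip_comm ta tb, abs_sub_comm]

lemma cellVal_symm (lists : List (List Int)) (a b : Nat) :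
    cellVal lists a b = cellVal lists b a := by
  unfold cellVal
  rw [map_abs_zip_comm]

lemma cellVal_fold (lists : List (List Int)) (a b : Nat) :
    pairDiff (PySem.List.sorted (lists.getD a []) (fun x => x) false)
             (PySem.List.sorted (lists.getD b []) (fun x => x) false) = cellVal lists a b := rfl

lemma map_sorted_getD (ls : List (List Int)) (i : Nat) :
    (ls.map (fun l => PySem.List.sorted l (fun x => x) false)).getD i [] =
      PySem.List.sorted (ls.getD i []) (fun x => x) false := by
  rw [List.getD, List.getD, List.getElem?_map]
  cases ls[i]? <;> rfl

-- (range n).map G read at an in-range index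
lemma getD_range_map {α : Type} {n i : Nat} (hi : i < n) (G : Nat → α) (d : α) :
    ((List.range n).map G).getD i d = G i := by
  rw [List.getD, List.getElem?_map, List.getElem?_range hi]
  rfl

-- setting one cell of (range n).map G (works for any index: out-of-range set is a no-op)
lemma set_range_map {α : Type} (n : Nat) (G : Nat → α) (c : Nat) (v : α) :
    ((List.range n).map G).set c v = (List.range n).map (fun j => if j = c then v else G j) := by
  apply List.ext_getElem?
  intro j
  rw [List.getElem?_set, List.length_map, List.length_range]
  by_cases hj : j < n
  · simp only [List.getElem?_map, List.getElem?_range hj, Option.map_some]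
    by_cases hc : c = j
    · subst hc; simp [hj]
    · simp [hc, Ne.symm hc]
  · have h1 : ((List.range n).map (fun j => if j = c then v else G j))[j]? = none :=
      List.getElem?_eq_none (by simp; omega)
    have h2 : ((List.range n).map G)[j]? = none := List.getElem?_eq_none (by simp; omega)
    rw [h1, h2]
    split_ifs <;> first | rfl | omega

-- the matrix after a of B's symmetric double writes, on a map-form matrix
lemma stepB_eq {n : Nat} (e : Nat → Nat → Option Int) (a b : Nat) (v : Option Int)
    (ha : a < n) (hb : b < n) (hab : a ≠ b) :
    ((((List.range n).map (fun i => (List.range n).map (e i))).set a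
        ((((List.range n).map (fun i => (List.range n).map (e i))).getD a []).set b v)).set b
      ((((((List.range n).map (fun i => (List.range n).map (e i))).set a
        ((((List.range n).map (fun i => (List.range n).map (e i))).getD a []).set b v))).getD b []).set a v)) =
    (List.range n).map (fun i => (List.range n).map (fun j =>
      if (i = a ∧ j = b) ∨ (i = b ∧ j = a) then v else e i j)) := by
  rw [getD_range_map ha, set_range_map n (e a) b v,
    set_range_map n (fun i => (List.range n).map (e i)) a
      ((List.range n).map (fun j => if j = b then v else e a j)),
    getD_range_map hb, if_neg (Ne.symm hab),
    set_range_map n (e b) a v,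
    set_range_map n
      (fun i => if i = a then (List.range n).map (fun j => if j = b then v else e a j)
                else (List.range n).map (e i)) b
      ((List.range n).map (fun j => if j = a then v else e b j))]
  apply List.map_congr_left
  intro i _
  by_cases hib : i = b
  · subst hib
    rw [if_pos rfl]
    apply List.map_congr_left
    intro j _
    by_cases hja : j = a <;> simp [hja, hab, Ne.symm hab]
  · rw [if_neg hib]
    by_cases hia : i = a
    · subst hia
      rw [if_pos rfl]
      apply List.map_congr_left
      intro j _
      by_cases hjb : j = b <;> simp [hjb, hib]
    · rw [if_neg hia]
      apply List.map_congr_left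
      intro j _
      simp [hia, hib]

-- B's inner loop on a map-form matrix
lemma innerB_fold (lists : List (List Int)) (n a : Nat) (ha : a < n) (l : List Nat)
    (hl : ∀ x ∈ l, a < x ∧ x < n) (e : Nat → Nat → Option Int) :
    (l.foldl (fun m b =>
        (m.set a ((m.getD a []).set b (some (cellVal lists a b)))).set b
          (((m.set a ((m.getD a []).set b (some (cellVal lists a b)))).getD b []).set a
            (some (cellVal lists a b))))
      ((List.range n).map (fun i => (List.range n).map (e i)))) =
    (List.range n).map (fun i => (List.range n).map (fun j =>
      if i = a ∧ j ∈ l then some (cellVal lists a j)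
      else if j = a ∧ i ∈ l then some (cellVal lists a i)
      else e i j)) := by
  revert hl
  induction l generalizing e with
  | nil => intro _; simp
  | cons b t ih =>
    intro hl
    obtain ⟨hab, hbn⟩ := hl b (List.mem_cons_self ..)
    have hl' : ∀ x ∈ t, a < x ∧ x < n := fun x hx => hl x (List.mem_cons_of_mem _ hx)
    have hat : a ∉ t := fun h => absurd (hl' a h).1 (lt_irrefl a)
    rw [List.foldl_cons,
      stepB_eq e a b (some (cellVal lists a b)) ha hbn (Nat.ne_of_lt hab),
      ih _ hl']
    have hxt : ∀ x ∈ t, a < x := fun x hx => (hl' x hx).1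
    clear ih hl hl'
    apply List.map_congr_left
    intro i _
    apply List.map_congr_left
    intro j _
    simp only [List.mem_cons]
    by_cases h1 : i = a <;> by_cases h2 : j = a <;> by_cases h3 : i = b <;> by_cases h4 : j = b <;>
      by_cases h5 : i ∈ t <;> by_cases h6 : j ∈ t <;> simp_all

-- the matrix after B's first k outer iterations
def entryMat (lists : List (List Int)) (n k : Nat) : List (List (Option Int)) :=
  (List.range n).map (fun i => (List.range n).map (fun j =>
    if ¬ i = j ∧ min i j < k then some (cellVal lists i j) else none))

lemma outerB_fold (lists : List (List Int)) (n k : Nat) (hk : k ≤ n) :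
    ((List.range k).foldl (fun m a =>
        (List.range' (a + 1) (n - (a + 1))).foldl (fun m b =>
          (m.set a ((m.getD a []).set b (some (cellVal lists a b)))).set b
            (((m.set a ((m.getD a []).set b (some (cellVal lists a b)))).getD b []).set a
              (some (cellVal lists a b)))) m)
      (entryMat lists n 0)) = entryMat lists n k := by
  induction k with
  | zero => rfl
  | succ k ihk =>
    have hk' : k ≤ n := by omega
    rw [List.range_succ, List.foldl_append, ihk hk', List.foldl_cons, List.foldl_nil]
    have hmem : ∀ x ∈ List.range' (k + 1) (n - (k + 1)), k < x ∧ x < n := by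
      intro x hx
      rw [List.mem_range'_1] at hx
      omega
    rw [show entryMat lists n k = (List.range n).map (fun i => (List.range n).map (fun j =>
        if ¬ i = j ∧ min i j < k then some (cellVal lists i j) else none)) from rfl,
      innerB_fold lists n k (by omega) _ hmem]
    unfold entryMat
    clear ihk hmem
    apply List.map_congr_left
    intro i hi
    apply List.map_congr_left
    intro j hj
    rw [List.mem_range] at hi hj
    simp only [List.mem_range'_1, show k + 1 + (n - (k + 1)) = n from by omega]
    by_cases h1 : i = k <;> by_cases h2 : j = k <;>
      by_cases h3 : k + 1 ≤ j ∧ j < n <;> by_cases h4 : k + 1 ≤ i ∧ i < n <;>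
      by_cases h5 : i = j <;>
      first
        | (simp_all <;> omega)
        | (simp_all <;> exact cellVal_symm lists k i)
        | (simp_all <;> (split_ifs <;> first | rfl | omega))

lemma alt_eq_target (lists : List (List Int)) :
    get_diff_matrix_alt lists =
      (List.range lists.length).map (fun a => targetRow lists lists.length a) := by
  show ((List.range (lists.map (fun l => PySem.List.sorted l (fun x => x) false)).length).foldl
      (fun m a =>
        (List.range' (a + 1) ((lists.map (fun l => PySem.List.sorted l (fun x => x) false)).length - (a + 1))).foldl
          (fun m b =>
            (m.set a ((m.getD a []).set b (some (pairDiff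
                ((lists.map (fun l => PySem.List.sorted l (fun x => x) false)).getD a [])
                ((lists.map (fun l => PySem.List.sorted l (fun x => x) false)).getD b []))))).set b
              (((m.set a ((m.getD a []).set b (some (pairDiff
                ((lists.map (fun l => PySem.List.sorted l (fun x => x) false)).getD a [])
                ((lists.map (fun l => PySem.List.sorted l (fun x => x) false)).getD b []))))).getD b []).set a
                (some (pairDiff
                  ((lists.map (fun l => PySem.List.sorted l (fun x => x) false)).getD a [])
                  ((lists.map (fun l => PySem.List.sorted l (fun x => x) false)).getD b []))))) m)
      ((List.range (lists.map (fun l => PySem.List.sorted l (fun x => x) false)).length).map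
        (fun _ => List.replicate (lists.map (fun l => PySem.List.sorted l (fun x => x) false)).length
          (none : Option Int)))) = _
  rw [List.length_map]
  simp only [map_sorted_getD, cellVal_fold]
  have hstart : (List.range lists.length).map
      (fun _ => List.replicate lists.length (none : Option Int)) = entryMat lists lists.length 0 := by
    unfold entryMat
    apply List.map_congr_left
    intro i _
    rw [show (fun j => if ¬ i = j ∧ min i j < 0 then some (cellVal lists i j) else none) =
        (fun _ : Nat => (none : Option Int)) from funext fun j => by simp]
    rw [List.map_const', List.length_range]
  rw [hstart, outerB_fold lists lists.length lists.length le_rfl]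
  unfold entryMat targetRow
  apply List.map_congr_left
  intro a ha
  apply List.map_congr_left
  intro b hb
  rw [List.mem_range] at ha hb
  by_cases h : b = a
  · subst h; simp
  · rw [if_pos ⟨by omega, by omega⟩, if_neg h, cellVal_symm]

-- ===== VERDICT (by name: the statement is the Claim_ definition above) =====
theorem get_diff_matrix_spec : Claim_equal_get_diff_matrix := by
  intro lists _
  show get_diff_matrix lists = get_diff_matrix_alt lists
  have hA : get_diff_matrix lists =
      (List.range lists.length).map (fun a => targetRow lists lists.length a) := by
    show ((List.range (lists.map (fun l => l.foldl (· + ·) 0)).length).foldl (fun m a =>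
        (List.range (lists.map (fun l => l.foldl (· + ·) 0)).length).foldl (fun m b =>
          if a = b then m
          else
            let m' :=
              if ((m.getD b []).getD a none).isSome then
                m.set a ((m.getD a []).set b ((m.getD b []).getD a none))
              else m
            m'.set a ((m'.getD a []).set b (some (cellVal lists a b)))) m)
        ((List.range (lists.map (fun l => l.foldl (· + ·) 0)).length).foldl
          (fun m _ => m ++ [List.replicate (lists.map (fun l => l.foldl (· + ·) 0)).length
            (none : Option Int)]) [])) = _
    rw [List.length_map, foldl_append_replicate, List.length_range, List.nil_append,
      outerFold_eq lists lists.length lists.length le_rfl]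
    apply List.map_congr_left
    intro a hma
    rw [if_pos (List.mem_range.mp hma)]
  rw [hA, alt_eq_target]
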